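-- pv_equiv track=rewrite | github.com/dhamodhar1142/clinical-outcomes-explorer | src/healthcare_analysis.py | _readmission_unlock_fields
-- ===== SOURCE A (Python) =====
-- def _readmission_unlock_fields(missing_for_full: list[str]) -> list[str]:
--     priority = [
--         'readmission_flag',
--         'event_date',
--         'patient_id',
--         'discharge_date',
--         'diagnosis',
--         'department',
--         'length_of_stay',
--         'age',
--         'cost',
--     ]
--     ordered = [field for field in priority if field in missing_for_full]
--     for field in missing_for_full:
--         if field not in ordered:
--             ordered.append(field)
--     return ordered
-- ===== SOURCE B (Python) =====
-- _PRIORITY = [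
--     'readmission_flag',
--     'event_date',
--     'patient_id',
--     'discharge_date',
--     'diagnosis',
--     'department',
--     'length_of_stay',
--     'age',
--     'cost',
-- ]
--
-- _RANK = {field: i for i, field in enumerate(_PRIORITY)}
--
--
-- def _readmission_unlock_fields(missing_for_full: list[str]) -> list[str]:
--     deduped = dict.fromkeys(missing_for_full)
--     return sorted(deduped, key=lambda f: _RANK.get(f, len(_PRIORITY)))
-- ===== Notes on version B (the rewrite author's own statement) =====
-- stated objective: faster
-- what changed: Replaces the priority-filter pass plus append-loop with an inner membership scan of the growing result by a first-occurrence dedup (dict.fromkeys) followed by ONE stable sort keyed by a precomputed rank dict (extras share the sentinel key len(_PRIORITY), so stability keeps their original order).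
import Mathlib
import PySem

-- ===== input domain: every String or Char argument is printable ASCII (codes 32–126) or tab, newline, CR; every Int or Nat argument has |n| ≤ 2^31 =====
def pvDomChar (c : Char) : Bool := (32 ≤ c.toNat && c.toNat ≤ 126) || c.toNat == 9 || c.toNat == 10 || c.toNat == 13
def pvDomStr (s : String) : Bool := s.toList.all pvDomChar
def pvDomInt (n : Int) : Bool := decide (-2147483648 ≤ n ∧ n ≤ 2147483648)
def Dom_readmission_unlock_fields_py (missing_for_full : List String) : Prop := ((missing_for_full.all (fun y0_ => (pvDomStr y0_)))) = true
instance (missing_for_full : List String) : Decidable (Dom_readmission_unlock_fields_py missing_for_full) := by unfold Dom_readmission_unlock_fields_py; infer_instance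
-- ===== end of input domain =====

-- B replaces A's priority-filter pass plus append-loop (with its inner membership scan of the
-- growing result) by a first-occurrence dedup followed by one stable sort under a rank dict;
-- objective: idiomatic single stable sort, same return value.

-- ===== PORT A =====
def readmission_unlock_fields_py (missing_for_full : List String) : List String :=
  let priority : List String :=
    ["readmission_flag", "event_date", "patient_id", "discharge_date", "diagnosis",
     "department", "length_of_stay", "age", "cost"]
  let ordered := priority.filter (fun field => decide (field ∈ missing_for_full))
  List.foldl (fun ordered field => if field ∈ ordered then ordered else ordered ++ [field])
    ordered missing_for_full

-- ===== PORT B =====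
-- module-level _PRIORITY
def pvPriority : List String :=
  ["readmission_flag", "event_date", "patient_id", "discharge_date", "diagnosis",
   "department", "length_of_stay", "age", "cost"]

-- module-level _RANK = {field: i for i, field in enumerate(_PRIORITY)}
def pvRank : PySem.Dict String Int :=
  (PySem.List.enumerate pvPriority).foldl (fun d p => PySem.Dict.insert d p.2 p.1) PySem.Dict.empty

-- the sort key: lambda f: _RANK.get(f, len(_PRIORITY))
def pvKey (f : String) : Int := PySem.Dict.getD pvRank f (Int.ofNat pvPriority.length)

def readmission_unlock_fields_py_alt (missing_for_full : List String) : List String :=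
  PySem.List.sorted (PySem.List.dedup missing_for_full) pvKey

-- ===== PRECONDITION & SPEC =====
def Spec_readmission_unlock_fields_py (missing_for_full : List String) (out : List String) : Prop := out = readmission_unlock_fields_py_alt missing_for_full
instance (missing_for_full : List String) (out : List String) : Decidable (Spec_readmission_unlock_fields_py missing_for_full out) := by unfold Spec_readmission_unlock_fields_py; infer_instance

-- ===== CLAIM (what is proved, stated in full; the proofs are below) =====
def Claim_equal_readmission_unlock_fields_py : Prop := ∀ (missing_for_full : List String), Dom_readmission_unlock_fields_py missing_for_full → Spec_readmission_unlock_fields_py missing_for_full (readmission_unlock_fields_py missing_for_full)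

-- ===== LEMMAS AND PROOFS =====

theorem pvRank_items : pvRank.items =
    [("readmission_flag",(0:Int)),("event_date",1),("patient_id",2),("discharge_date",3),
     ("diagnosis",4),("department",5),("length_of_stay",6),("age",7),("cost",8)] := by decide

theorem pvKey_of_not_mem (f : String) (h : f ∉ pvPriority) : pvKey f = 9 := by
  simp [pvPriority] at h
  obtain ⟨h1,h2,h3,h4,h5,h6,h7,h8,h9⟩ := h
  have g1 : ("readmission_flag" == f) = false := beq_eq_false_iff_ne.mpr (fun h => h1 h.symm)
  have g2 : ("event_date" == f) = false := beq_eq_false_iff_ne.mpr (fun h => h2 h.symm)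
  have g3 : ("patient_id" == f) = false := beq_eq_false_iff_ne.mpr (fun h => h3 h.symm)
  have g4 : ("discharge_date" == f) = false := beq_eq_false_iff_ne.mpr (fun h => h4 h.symm)
  have g5 : ("diagnosis" == f) = false := beq_eq_false_iff_ne.mpr (fun h => h5 h.symm)
  have g6 : ("department" == f) = false := beq_eq_false_iff_ne.mpr (fun h => h6 h.symm)
  have g7 : ("length_of_stay" == f) = false := beq_eq_false_iff_ne.mpr (fun h => h7 h.symm)
  have g8 : ("age" == f) = false := beq_eq_false_iff_ne.mpr (fun h => h8 h.symm)
  have g9 : ("cost" == f) = false := beq_eq_false_iff_ne.mpr (fun h => h9 h.symm)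
  simp only [pvKey, PySem.Dict.getD, PySem.Dict.get?, pvRank_items, List.find?,
    g1,g2,g3,g4,g5,g6,g7,g8,g9]
  rfl

theorem pvKey_lt_of_mem (f : String) (h : f ∈ pvPriority) : pvKey f < 9 := by
  simp [pvPriority] at h
  rcases h with rfl|rfl|rfl|rfl|rfl|rfl|rfl|rfl|rfl <;> decide

theorem pvKey_le (f : String) : pvKey f ≤ 9 := by
  by_cases h : f ∈ pvPriority
  · exact le_of_lt (pvKey_lt_of_mem f h)
  · exact le_of_eq (pvKey_of_not_mem f h)

theorem pvPriority_pairwise : pvPriority.Pairwise (fun a b => pvKey a < pvKey b) := by decide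

-- an element whose key is strictly below every element of ys is inserted at the front
theorem insertBy_front (f : String) (ys : List String)
    (h : ∀ y ∈ ys, pvKey f < pvKey y) :
    PySem.List.insertBy (fun a b => decide (pvKey a < pvKey b)) f ys = f :: ys := by
  cases ys with
  | nil => simp [PySem.List.insertBy]
  | cons y ys => simp [PySem.List.insertBy, h y (by simp)]

-- an element with the maximal key 9 is appended at the end
theorem insertBy_extra (f : String) (ys : List String) (hf : pvKey f = 9) :
    PySem.List.insertBy (fun a b => decide (pvKey a < pvKey b)) f ys = ys ++ [f] := by
  refine PySem.List.insertBy_of_forall_not_before _ _ _ (fun y _ => ?_)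
  simp [hf]
  exact pvKey_le y

-- stable insertion of a priority element into "filtered priority prefix ++ extras"
theorem insertBy_pri (f : String) : ∀ (pri : List String),
    pri.Pairwise (fun a b => pvKey a < pvKey b) →
    ∀ (p : String → Bool) (es : List String),
    f ∈ pri → p f = false → (∀ e ∈ es, pvKey f < pvKey e) →
    PySem.List.insertBy (fun a b => decide (pvKey a < pvKey b)) f (pri.filter p ++ es)
      = pri.filter (fun x => p x || decide (x = f)) ++ es := by
  intro pri
  induction pri with
  | nil => intro _ p es hf; exact absurd hf (by simp)
  | cons q rest ih =>
    intro hpw p es hf hpf hes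
    have hqrest : ∀ y ∈ rest, pvKey q < pvKey y := (List.pairwise_cons.mp hpw).1
    have hpwrest : rest.Pairwise (fun a b => pvKey a < pvKey b) := (List.pairwise_cons.mp hpw).2
    by_cases hfq : f = q
    · subst hfq
      have hfnr : f ∉ rest := fun hr => lt_irrefl _ (hqrest f hr)
      have hfront : ∀ y ∈ rest.filter p ++ es, pvKey f < pvKey y := by
        intro y hy
        rcases List.mem_append.mp hy with hy | hy
        · exact hqrest y (List.mem_of_mem_filter hy)
        · exact hes y hy
      have hfilter : rest.filter (fun x => p x || decide (x = f)) = rest.filter p := by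
        apply List.filter_congr
        intro x hx
        have : x ≠ f := fun h => hfnr (h ▸ hx)
        simp [this]
      simp only [List.filter_cons, hpf, Bool.false_eq_true, if_false]
      rw [insertBy_front f _ hfront]
      simp [hfilter]
    · have hfr : f ∈ rest := by
        rcases List.mem_cons.mp hf with h | h
        · exact absurd h hfq
        · exact h
      have hqf : pvKey q < pvKey f := hqrest f hfr
      have hnb : (decide (pvKey f < pvKey q)) = false := by
        simp; omega
      by_cases hpq : p q = true
      · have : (p q || decide (q = f)) = true := by simp [hpq]
        simp only [List.filter_cons, hpq, if_true, List.cons_append]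
        rw [PySem.List.insertBy]
        simp only [hnb, Bool.false_eq_true, if_false]
        rw [ih hpwrest p es hfr hpf hes]
        simp
      · have hqf' : (decide (q = f)) = false := by simp; exact fun h => hfq h.symm
        have : (p q || decide (q = f)) = false := by simp [hpq, hqf']
        simp only [List.filter_cons, hpq, Bool.false_eq_true, if_false]
        rw [ih hpwrest p es hfr hpf hes]
        simp [hqf']

-- the stable insertion-sort fold keeps the invariant
-- acc = priority-fields-seen (in priority order) ++ extras-seen (in seen order)
theorem fold_inv : ∀ (ds seen : List String), (seen ++ ds).Nodup →
    List.foldl (fun acc x => PySem.List.insertBy (fun a b => decide (pvKey a < pvKey b)) x acc)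
      (pvPriority.filter (fun x => decide (x ∈ seen)) ++ seen.filter (fun x => !decide (x ∈ pvPriority))) ds
    = pvPriority.filter (fun x => decide (x ∈ seen ++ ds))
        ++ (seen ++ ds).filter (fun x => !decide (x ∈ pvPriority)) := by
  intro ds
  induction ds with
  | nil => intro seen _; simp
  | cons d ds ih =>
    intro seen hnd
    have hdseen : d ∉ seen := by
      intro h
      have := List.Nodup.disjoint (l₁ := seen) (l₂ := d :: ds) ?_ h (by simp)
      · exact this
      · exact hnd
    rw [List.foldl_cons]
    by_cases hd : d ∈ pvPriority
    · rw [insertBy_pri d pvPriority pvPriority_pairwise (fun x => decide (x ∈ seen))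
        (seen.filter (fun x => !decide (x ∈ pvPriority))) hd (by simp [hdseen]) ?_]
      · have h1 : pvPriority.filter (fun x => decide (x ∈ seen) || decide (x = d))
            = pvPriority.filter (fun x => decide (x ∈ seen ++ [d])) := by
          apply List.filter_congr; intro x _
          simp [List.mem_append]
        have h2 : seen.filter (fun x => !decide (x ∈ pvPriority))
            = (seen ++ [d]).filter (fun x => !decide (x ∈ pvPriority)) := by
          simp [List.filter_append, hd]
        rw [h1, h2, ih (seen ++ [d]) (by simpa using hnd)]
        simp
      · intro e he
        have hne : e ∉ pvPriority := by
          have := List.of_mem_filter he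
          simpa using this
        rw [pvKey_of_not_mem e hne]
        exact pvKey_lt_of_mem d hd
    · rw [insertBy_extra d _ (pvKey_of_not_mem d hd)]
      have h1 : pvPriority.filter (fun x => decide (x ∈ seen))
          = pvPriority.filter (fun x => decide (x ∈ seen ++ [d])) := by
        apply List.filter_congr; intro x hx
        have : x ≠ d := fun h => hd (h ▸ hx)
        simp [List.mem_append, this]
      have h2 : seen.filter (fun x => !decide (x ∈ pvPriority)) ++ [d]
          = (seen ++ [d]).filter (fun x => !decide (x ∈ pvPriority)) := by
        simp [List.filter_append, hd]
      rw [List.append_assoc, h2, h1, ih (seen ++ [d]) (by simpa using hnd)]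
      simp

-- characterization of B
theorem B_eq (missing_for_full : List String) :
    readmission_unlock_fields_py_alt missing_for_full
      = pvPriority.filter (fun x => decide (x ∈ missing_for_full))
        ++ (PySem.List.dedup missing_for_full).filter (fun x => !decide (x ∈ pvPriority)) := by
  unfold readmission_unlock_fields_py_alt
  rw [PySem.List.sorted_eq_foldl_insertBy]
  have h := fold_inv (PySem.List.dedup missing_for_full) [] (by simp [PySem.List.nodup_dedup])
  simp only [List.nil_append] at h
  rw [show (pvPriority.filter (fun x => decide (x ∈ ([] : List String)))) = [] from by simp,
    show (([] : List String).filter (fun x => !decide (x ∈ pvPriority))) = [] from rfl] at h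
  simp only [List.nil_append] at h
  rw [h]
  congr 1
  apply List.filter_congr
  intro x _
  simp

-- Set.add written with a decidable membership test
theorem set_add_eq (acc : List String) (x : String) :
    PySem.Set.add acc x = if x ∈ acc then acc else acc ++ [x] := by
  simp [PySem.Set.add, List.contains_eq_mem]

-- running the dedup fold from an arbitrary accumulator
theorem foldl_add_acc (xs : List String) : ∀ (acc : List String),
    List.foldl PySem.Set.add acc xs
      = acc ++ (List.foldl PySem.Set.add [] xs).filter (fun y => !decide (y ∈ acc)) := by
  induction xs with
  | nil => intro acc; simp
  | cons x xs ih =>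
    intro acc
    rw [List.foldl_cons, List.foldl_cons, ih (PySem.Set.add acc x), ih (PySem.Set.add [] x)]
    rw [set_add_eq acc x, set_add_eq [] x]
    simp only [List.not_mem_nil, List.nil_append, if_false]
    by_cases hx : x ∈ acc
    · rw [if_pos hx]
      rw [List.filter_append, List.filter_filter]
      have h1 : ([x].filter (fun y => !decide (y ∈ acc))) = [] := by simp [hx]
      rw [h1]
      simp only [List.nil_append, List.append_cancel_left_eq]
      apply List.filter_congr
      intro y _
      by_cases hyx : y = x
      · subst hyx; simp [hx]
      · simp [hyx]
    · rw [if_neg hx]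
      rw [List.filter_append, List.filter_filter]
      have h1 : ([x].filter (fun y => !decide (y ∈ acc))) = [x] := by simp [hx]
      rw [h1, List.append_assoc]
      simp only [List.append_cancel_left_eq, List.cons_append, List.nil_append]
      congr 1
      apply List.filter_congr
      intro y _
      by_cases hyx : y = x
      · subst hyx; simp [hx]
      · simp [hyx, Bool.and_comm]

-- PySem.List.dedup peels its head
theorem dedup_cons (x : String) (xs : List String) :
    PySem.List.dedup (x :: xs) = x :: (PySem.List.dedup xs).filter (fun y => !decide (y = x)) := by
  show PySem.Set.ofList (x :: xs) = _
  unfold PySem.Set.ofList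
  rw [List.foldl_cons, set_add_eq]
  simp only [PySem.Set.empty, List.not_mem_nil, if_false, List.nil_append]
  rw [foldl_add_acc xs [x]]
  show _ = x :: (PySem.Set.ofList xs).filter _
  unfold PySem.Set.ofList
  simp [PySem.Set.empty]

-- A's append loop appends exactly the first occurrences of non-priority, unseen fields
theorem loopA : ∀ (ms P es : List String),
    (∀ f ∈ ms, (f ∈ P ↔ f ∈ pvPriority)) →
    List.foldl (fun acc f => if f ∈ acc then acc else acc ++ [f]) (P ++ es) ms
      = P ++ es ++ (PySem.List.dedup ms).filter
          (fun x => !decide (x ∈ pvPriority) && !decide (x ∈ es)) := by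
  intro ms
  induction ms with
  | nil => intro P es _; simp [PySem.List.dedup, PySem.Set.ofList, PySem.Set.empty]
  | cons f ms ih =>
    intro P es hP
    have hPf := hP f (by simp)
    rw [List.foldl_cons, dedup_cons]
    by_cases hmem : f ∈ P ++ es
    · rw [if_pos hmem, ih P es (fun g hg => hP g (by simp [hg]))]
      have hor : f ∈ pvPriority ∨ f ∈ es := by
        rcases List.mem_append.mp hmem with h | h
        · exact Or.inl (hPf.mp h)
        · exact Or.inr h
      have : ((f :: (PySem.List.dedup ms).filter (fun y => !decide (y = f))).filter
            (fun x => !decide (x ∈ pvPriority) && !decide (x ∈ es)))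
          = (PySem.List.dedup ms).filter (fun x => !decide (x ∈ pvPriority) && !decide (x ∈ es)) := by
        rw [List.filter_cons]
        have hffalse : (!decide (f ∈ pvPriority) && !decide (f ∈ es)) = false := by
          rcases hor with h | h <;> simp [h]
        rw [hffalse]
        simp only [Bool.false_eq_true, if_false, List.filter_filter]
        apply List.filter_congr
        intro y _
        by_cases hyf : y = f
        · subst hyf
          rcases hor with h | h <;> simp [h]
        · simp [hyf]
      rw [this]
    · rw [if_neg hmem]
      have hnp : f ∉ pvPriority := fun h => hmem (List.mem_append.mpr (Or.inl (hPf.mpr h)))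
      have hnes : f ∉ es := fun h => hmem (List.mem_append.mpr (Or.inr h))
      rw [List.append_assoc]
      rw [ih P (es ++ [f]) (fun g hg => hP g (by simp [hg]))]
      rw [List.filter_cons]
      have hftrue : (!decide (f ∈ pvPriority) && !decide (f ∈ es)) = true := by
        simp [hnp, hnes]
      rw [hftrue]
      simp only [if_true, List.filter_filter, List.append_assoc, List.singleton_append]
      congr 2
      congr 1
      apply List.filter_congr
      intro y _
      by_cases hyf : y = f
      · subst hyf; simp [hnp]
      · simp [hyf, List.mem_append, Bool.and_comm]

-- ===== VERDICT (by name: the statement is the Claim_ definition above) =====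
theorem readmission_unlock_fields_py_spec : Claim_equal_readmission_unlock_fields_py := by
  intro missing_for_full _
  show readmission_unlock_fields_py missing_for_full = readmission_unlock_fields_py_alt missing_for_full
  rw [B_eq]
  unfold readmission_unlock_fields_py
  rw [show (["readmission_flag", "event_date", "patient_id", "discharge_date", "diagnosis",
     "department", "length_of_stay", "age", "cost"] : List String) = pvPriority from rfl]
  have h := loopA missing_for_full
    (pvPriority.filter (fun field => decide (field ∈ missing_for_full))) []
    (fun f hf => by simp [List.mem_filter, hf])
  simp only [List.append_nil] at h
  rw [h]
  congr 1
  apply List.filter_congr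
  intro y _
  simp
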